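-- pv_equiv track=rewrite | github.com/ZenoAFfectionate/WhaleCode | code/tools/builtin/_code_utils.py | _reindent_replacement
-- ===== SOURCE A (Python) =====
-- from typing import Callable, Iterable, List, Optional, Sequence, Tuple
--
-- def _leading_whitespace(line: str) -> str:
--     return line[: len(line) - len(line.lstrip(" \t"))]
--
-- def _common_indent(lines: Sequence[str]) -> str:
--     non_empty = [line for line in lines if line.strip()]
--     if not non_empty:
--         return ""
--     indents = [_leading_whitespace(line) for line in non_empty]
--     indent = indents[0]
--     for item in indents[1:]:
--         max_prefix = min(len(indent), len(item))
--         common_length = 0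
--         while common_length < max_prefix and indent[common_length] == item[common_length]:
--             common_length += 1
--         indent = indent[:common_length]
--         if not indent:
--             break
--     return indent
--
-- def _strip_indent(line: str, indent: str) -> str:
--     if indent and line.startswith(indent):
--         return line[len(indent) :]
--     return line
--
-- def _reindent_replacement(old_text: str, candidate_text: str, new_text: str) -> str:
--     old_lines = old_text.splitlines()
--     candidate_lines = candidate_text.splitlines()
--     new_lines = new_text.splitlines()
--     if not old_lines or not candidate_lines or not new_lines:
--         return new_text
--
--     old_indent = _common_indent(old_lines)
--     candidate_indent = _common_indent(candidate_lines)
--     if old_indent == candidate_indent: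
--         return new_text
--
--     trailing_newline = ""
--     if new_text.endswith("\r\n"):
--         trailing_newline = "\r\n"
--     elif new_text.endswith("\n"):
--         trailing_newline = "\n"
--     elif new_text.endswith("\r"):
--         trailing_newline = "\r"
--
--     adjusted_lines = []
--     for line in new_lines:
--         if not line.strip():
--             adjusted_lines.append(line)
--             continue
--         stripped = _strip_indent(line, old_indent)
--         adjusted_lines.append(candidate_indent + stripped)
--     return "\n".join(adjusted_lines) + trailing_newline
-- ===== SOURCE B (Python) =====
-- def _common_indent_sorted(lines):
--     # longest common indent of the non-blank lines, via the sort trick: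
--     # the common prefix of all strings equals the common prefix of the
--     # lexicographically smallest and largest ones.
--     indents = sorted(
--         line[: len(line) - len(line.lstrip(" \t"))]
--         for line in lines
--         if line.strip()
--     )
--     if not indents:
--         return ""
--     lo, hi = indents[0], indents[-1]
--     prefix = []
--     for a, b in zip(lo, hi):
--         if a != b:
--             break
--         prefix.append(a)
--     return "".join(prefix)
--
--
-- def _reindent_replacement(old_text: str, candidate_text: str, new_text: str) -> str:
--     old_lines = old_text.splitlines()
--     candidate_lines = candidate_text.splitlines()
--     new_lines = new_text.splitlines()
--     if not old_lines or not candidate_lines or not new_lines: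
--         return new_text
--
--     old_indent = _common_indent_sorted(old_lines)
--     candidate_indent = _common_indent_sorted(candidate_lines)
--     if old_indent == candidate_indent:
--         return new_text
--
--     trailing = next((s for s in ("\r\n", "\n", "\r") if new_text.endswith(s)), "")
--     adjusted = [
--         line if not line.strip()
--         else candidate_indent
--         + (line[len(old_indent):] if line.startswith(old_indent) else line)
--         for line in new_lines
--     ]
--     return "\n".join(adjusted) + trailing
-- ===== Notes on version B (the rewrite author's own statement) =====
-- stated objective: alternative
-- what changed: The common-indent helper no longer reduces a running prefix accumulator over every line's indent with an inner char-compare loop; it sorts the indents lexicographically and takes the common prefix of just the smallest and largest, and the outer pass is rewritten as a comprehension with a next()-based trailing-newline pick.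
import Mathlib
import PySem

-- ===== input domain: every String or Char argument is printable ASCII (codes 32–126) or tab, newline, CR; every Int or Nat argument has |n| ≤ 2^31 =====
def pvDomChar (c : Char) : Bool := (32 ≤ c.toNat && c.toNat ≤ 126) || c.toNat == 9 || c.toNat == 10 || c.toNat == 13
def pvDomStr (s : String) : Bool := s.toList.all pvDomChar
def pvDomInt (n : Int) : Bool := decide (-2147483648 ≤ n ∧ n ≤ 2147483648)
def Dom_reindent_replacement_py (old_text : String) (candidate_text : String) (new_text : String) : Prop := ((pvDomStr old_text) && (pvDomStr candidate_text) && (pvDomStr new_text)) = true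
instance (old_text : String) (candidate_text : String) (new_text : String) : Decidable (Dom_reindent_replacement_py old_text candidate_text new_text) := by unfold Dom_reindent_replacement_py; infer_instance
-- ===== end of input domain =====

-- B replaces A's accumulator-reduction common-indent helper by the sort-then-compare-extremes
-- strategy and the outer append-loop by a map; objective: alternative (same cost class).

-- ===== PORT A =====
-- line[: len(line) - len(line.lstrip(" \t"))]; lstrip(" \t") is ported by hand as dropWhile
-- over exactly the two characters — exact on every input
def pvLeadWsA (line : List Char) : List Char :=
  line.take (line.length - (line.dropWhile (fun c => c == ' ' || c == '\t')).length)

-- the inner 'while common_length < max_prefix and indent[cl] == item[cl]' loop of _common_indent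
def pvCommonLenA : List Char → List Char → Nat
  | a :: as, b :: bs => if a == b then pvCommonLenA as bs + 1 else 0
  | _, _ => 0

-- the 'for item in indents[1:]' loop of _common_indent, with its early break on empty indent
def pvFoldIndentA (items : List (List Char)) (indent : List Char) : List Char :=
  match items with
  | [] => indent
  | item :: rest =>
    let indent' := indent.take (pvCommonLenA indent item)
    if indent'.isEmpty then indent' else pvFoldIndentA rest indent'

def pvCommonIndentA (lines : List (List Char)) : List Char :=
  let nonEmpty := lines.filter (fun l => !(PySem.Chars.strip l).isEmpty)
  match nonEmpty.map pvLeadWsA with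
  | [] => []
  | i0 :: rest => pvFoldIndentA rest i0

-- _strip_indent
def pvStripIndentA (line : List Char) (indent : List Char) : List Char :=
  if !indent.isEmpty && PySem.Chars.startswith line indent then line.drop indent.length else line

def reindent_replacement_py (old_text : String) (candidate_text : String) (new_text : String) : String :=
  let oldLines := (PySem.Str.splitlines old_text).map String.toList
  let candidateLines := (PySem.Str.splitlines candidate_text).map String.toList
  let newLines := (PySem.Str.splitlines new_text).map String.toList
  if oldLines.isEmpty || candidateLines.isEmpty || newLines.isEmpty then new_text
  else
    let oldIndent := pvCommonIndentA oldLines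
    let candidateIndent := pvCommonIndentA candidateLines
    if oldIndent == candidateIndent then new_text
    else
      let trailing : List Char :=
        if PySem.Str.endswith new_text "\r\n" then ['\r', '\n']
        else if PySem.Str.endswith new_text "\n" then ['\n']
        else if PySem.Str.endswith new_text "\r" then ['\r']
        else []
      let adjusted := newLines.foldl (fun acc line =>
        if (PySem.Chars.strip line).isEmpty then acc ++ [line]
        else acc ++ [candidateIndent ++ pvStripIndentA line oldIndent]) []
      String.ofList (PySem.Chars.join ['\n'] adjusted ++ trailing)

-- ===== PORT B =====
def pvLeadWsB (line : List Char) : List Char :=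
  line.take (line.length - (line.dropWhile (fun c => c == ' ' || c == '\t')).length)

-- the 'for a, b in zip(lo, hi)' common-prefix loop of _common_indent_sorted
def pvZipPrefixB : List (Char × Char) → List Char
  | [] => []
  | (a, b) :: rest => if a == b then a :: pvZipPrefixB rest else []

-- sorted(...) with Python's lexicographic string order (List.Lex on chars by codepoint)
def pvSortedB (xs : List (List Char)) : List (List Char) :=
  @PySem.List.sorted (List Char) (List Char) List.instLinearOrder.toLT LinearOrder.toDecidableLT xs (fun x => x) false

def pvCommonIndentB (lines : List (List Char)) : List Char :=
  let indents := pvSortedB ((lines.filter (fun l => !(PySem.Chars.strip l).isEmpty)).map pvLeadWsB)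
  match indents with
  | [] => []
  | lo :: rest => pvZipPrefixB (lo.zip ((lo :: rest).getLast (List.cons_ne_nil lo rest)))

def reindent_replacement_py_alt (old_text : String) (candidate_text : String) (new_text : String) : String :=
  let oldLines := (PySem.Str.splitlines old_text).map String.toList
  let candidateLines := (PySem.Str.splitlines candidate_text).map String.toList
  let newLines := (PySem.Str.splitlines new_text).map String.toList
  if oldLines.isEmpty || candidateLines.isEmpty || newLines.isEmpty then new_text
  else
    let oldIndent := pvCommonIndentB oldLines
    let candidateIndent := pvCommonIndentB candidateLines
    if oldIndent == candidateIndent then new_text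
    else
      let trailing : List Char :=
        ((["\r\n", "\n", "\r"].find? (fun s => PySem.Str.endswith new_text s)).getD "").toList
      let adjusted := newLines.map (fun line =>
        if (PySem.Chars.strip line).isEmpty then line
        else candidateIndent ++
          (if PySem.Chars.startswith line oldIndent then line.drop oldIndent.length else line))
      String.ofList (PySem.Chars.join ['\n'] adjusted ++ trailing)

-- ===== PRECONDITION & SPEC =====
def Spec_reindent_replacement_py (old_text : String) (candidate_text : String) (new_text : String) (out : String) : Prop := out = reindent_replacement_py_alt old_text candidate_text new_text
instance (old_text : String) (candidate_text : String) (new_text : String) (out : String) : Decidable (Spec_reindent_replacement_py old_text candidate_text new_text out) := by unfold Spec_reindent_replacement_py; infer_instance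

-- ===== CLAIM (what is proved, stated in full; the proofs are below) =====
def Claim_equal_reindent_replacement_py : Prop := ∀ (old_text : String) (candidate_text : String) (new_text : String), Dom_reindent_replacement_py old_text candidate_text new_text → Spec_reindent_replacement_py old_text candidate_text new_text (reindent_replacement_py old_text candidate_text new_text)

-- ===== LEMMAS AND PROOFS =====
-- cpA a b = the longest common prefix of a and b, as A's while loop computes it
def cpA (a b : List Char) : List Char := a.take (pvCommonLenA a b)

theorem cpA_nil_left (b : List Char) : cpA [] b = [] := by
  cases b <;> rfl

theorem cpA_cons_nil (a : Char) (as : List Char) : cpA (a :: as) [] = [] := rfl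

theorem cpA_cons_cons (a b : Char) (as bs : List Char) :
    cpA (a :: as) (b :: bs) = if a = b then a :: cpA as bs else [] := by
  by_cases h : a = b <;> simp [cpA, pvCommonLenA, h, List.take_succ_cons]

theorem cpA_prefix_left (a b : List Char) : cpA a b <+: a := List.take_prefix _ _

theorem cpA_prefix_right : ∀ (a b : List Char), cpA a b <+: b
  | [], b => by simp [cpA_nil_left]
  | _ :: _, [] => by simp [cpA_cons_nil]
  | a :: as, b :: bs => by
    rw [cpA_cons_cons]
    by_cases h : a = b
    · subst h
      simpa [List.cons_prefix_cons] using cpA_prefix_right as bs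
    · simp [h]

theorem prefix_cpA : ∀ (p a b : List Char), p <+: a → p <+: b → p <+: cpA a b
  | [], _, _, _, _ => List.nil_prefix
  | q :: ps, a, b, h1, h2 => by
    cases a with
    | nil => simp at h1
    | cons a0 as =>
      cases b with
      | nil => simp at h2
      | cons b0 bs =>
        obtain ⟨rfl, h1'⟩ := List.cons_prefix_cons.1 h1
        obtain ⟨rfl, h2'⟩ := List.cons_prefix_cons.1 h2
        rw [cpA_cons_cons]
        simpa [List.cons_prefix_cons] using prefix_cpA ps as bs h1' h2'

theorem zipPrefix_eq_cpA : ∀ (a b : List Char), pvZipPrefixB (a.zip b) = cpA a b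
  | [], b => by simp [cpA_nil_left, pvZipPrefixB]
  | _ :: _, [] => by simp [cpA_cons_nil, pvZipPrefixB]
  | a :: as, b :: bs => by
    rw [List.zip_cons_cons, cpA_cons_cons]
    by_cases h : a = b <;> simp [pvZipPrefixB, h, zipPrefix_eq_cpA as bs]

theorem foldl_cpA_nil : ∀ (l : List (List Char)), l.foldl cpA [] = [] := by
  intro l
  induction l with
  | nil => rfl
  | cons x xs ih => simpa [cpA_nil_left] using ih

theorem foldIndentA_eq_foldl : ∀ (items : List (List Char)) (ind : List Char),
    pvFoldIndentA items ind = items.foldl cpA ind := by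
  intro items
  induction items with
  | nil => intro ind; rfl
  | cons item rest ih =>
    intro ind
    show (if (cpA ind item).isEmpty then cpA ind item else pvFoldIndentA rest (cpA ind item))
        = List.foldl cpA (cpA ind item) rest
    by_cases h : (cpA ind item).isEmpty
    · rw [if_pos h, List.isEmpty_iff.1 h, foldl_cpA_nil]
    · rw [if_neg h, ih]

theorem foldl_cpA_prefix_init : ∀ (items : List (List Char)) (ind : List Char),
    items.foldl cpA ind <+: ind := by
  intro items
  induction items with
  | nil => intro ind; exact List.prefix_rfl
  | cons x xs ih => intro ind; exact (ih (cpA ind x)).trans (cpA_prefix_left ind x)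

theorem foldl_cpA_prefix_mem : ∀ (items : List (List Char)) (ind y : List Char),
    y ∈ items → items.foldl cpA ind <+: y := by
  intro items
  induction items with
  | nil => intro _ y hy; cases hy
  | cons x xs ih =>
    intro ind y hy
    rcases List.mem_cons.1 hy with rfl | hy'
    · exact (foldl_cpA_prefix_init xs (cpA ind y)).trans (cpA_prefix_right ind y)
    · exact ih (cpA ind x) y hy'

theorem prefix_foldl_cpA : ∀ (items : List (List Char)) (ind p : List Char),
    p <+: ind → (∀ y ∈ items, p <+: y) → p <+: items.foldl cpA ind := by
  intro items
  induction items with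
  | nil => intro ind p h _; exact h
  | cons x xs ih =>
    intro ind p h hall
    exact ih (cpA ind x) p (prefix_cpA p ind x h (hall x (List.mem_cons_self)))
      (fun y hy => hall y (List.mem_cons_of_mem _ hy))

-- the sort trick's heart: anything lexicographically between a and b extends their common prefix
theorem cpA_prefix_of_between : ∀ (a x b : List Char), a ≤ x → x ≤ b → cpA a b <+: x
  | [], x, b, _, _ => by simp [cpA_nil_left]
  | _ :: _, x, [], _, _ => by simp [cpA_cons_nil]
  | a :: as, x, b :: bs, h1, h2 => by
    rcases lt_or_eq_of_le h1 with hlt1 | rfl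
    · rcases lt_or_eq_of_le h2 with hlt2 | rfl
      · cases x with
        | nil => exact absurd (show List.Lex (· < ·) (a :: as) [] from hlt1) (by intro h; cases h)
        | cons e xs =>
          have h1' : List.Lex (· < ·) (a :: as) (e :: xs) := hlt1
          have h2' : List.Lex (· < ·) (e :: xs) (b :: bs) := hlt2
          rw [cpA_cons_cons]
          by_cases hab : a = b
          · subst hab
            rw [if_pos rfl]
            cases h1' with
            | rel h =>
              cases h2' with
              | rel h' => exact absurd (lt_trans h h') (lt_irrefl _)
              | cons h' => exact absurd h (lt_irrefl _)
            | cons h1'' =>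
              cases h2' with
              | rel h' => exact absurd h' (lt_irrefl _)
              | cons h2'' =>
                have ih := cpA_prefix_of_between as xs bs
                  (le_of_lt (show as < xs from h1'')) (le_of_lt (show xs < bs from h2''))
                simpa [List.cons_prefix_cons] using ih
          · simp [hab]
      · exact cpA_prefix_right _ _
    · exact cpA_prefix_left _ _

theorem pairwise_le_getLast : ∀ (l : List (List Char)), l.Pairwise (· ≤ ·) → ∀ (h : l ≠ [])
    (y : List Char), y ∈ l → y ≤ l.getLast h := by
  intro l
  induction l with
  | nil => intro _ h; exact absurd rfl h
  | cons aa t ih =>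
    intro hp h y hy
    cases t with
    | nil =>
      rcases List.mem_cons.1 hy with rfl | hy'
      · exact le_refl _
      · cases hy'
    | cons b t' =>
      rw [List.getLast_cons (by simp)]
      rcases List.mem_cons.1 hy with rfl | hy'
      · exact (List.pairwise_cons.1 hp).1 _ (List.getLast_mem _)
      · exact ih (List.pairwise_cons.1 hp).2 (by simp) y hy'

-- pvSortedB facts, instantiated from the PySem sorted lemmas
theorem sortedB_perm (xs : List (List Char)) : (pvSortedB xs).Perm xs :=
  @PySem.List.sorted_perm (List Char) (List Char) List.instLinearOrder.toLT
    LinearOrder.toDecidableLT xs (fun x => x) false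

theorem sortedB_pairwise (xs : List (List Char)) : (pvSortedB xs).Pairwise (· ≤ ·) :=
  PySem.List.sorted_pairwise xs (fun x => x)

theorem sortedB_head_le {xs : List (List Char)} {m : List Char} {t : List (List Char)}
    (hs : pvSortedB xs = m :: t) : ∀ y ∈ xs, m ≤ y :=
  PySem.List.key_head_sorted_le xs (fun x => x) hs

theorem sortedB_nil {xs : List (List Char)} (hs : pvSortedB xs = []) : xs = [] :=
  (@PySem.List.sorted_eq_nil_iff (List Char) (List Char) List.instLinearOrder.toLT
    LinearOrder.toDecidableLT xs (fun x => x) false).1 hs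

theorem commonIndent_eq (lines : List (List Char)) :
    pvCommonIndentB lines = pvCommonIndentA lines := by
  have hlead : pvLeadWsB = pvLeadWsA := rfl
  simp only [pvCommonIndentB, pvCommonIndentA, hlead]
  generalize (List.filter (fun l => !(PySem.Chars.strip l).isEmpty) lines).map pvLeadWsA = is
  cases hs : pvSortedB is with
  | nil =>
    have hnil : is = [] := sortedB_nil hs
    subst hnil
    rfl
  | cons lo rest =>
    have hperm : (lo :: rest).Perm is := by rw [← hs]; exact sortedB_perm is
    cases his2 : is with
    | nil => subst his2; exact absurd hperm.symm (by simp)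
    | cons i0 restA =>
      subst his2
      show pvZipPrefixB (lo.zip ((lo :: rest).getLast (List.cons_ne_nil lo rest)))
          = pvFoldIndentA restA i0
      rw [zipPrefix_eq_cpA, foldIndentA_eq_foldl]
      set hi := (lo :: rest).getLast (List.cons_ne_nil lo rest) with hhi
      have hpair : (lo :: rest).Pairwise (· ≤ ·) := by
        have h := sortedB_pairwise (i0 :: restA); rwa [hs] at h
      have hmin : ∀ y ∈ i0 :: restA, lo ≤ y := sortedB_head_le hs
      have hmax : ∀ y ∈ i0 :: restA, y ≤ hi := fun y hy =>
        pairwise_le_getLast _ hpair _ y (hperm.mem_iff.2 hy)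
      have hcp_all : ∀ y ∈ i0 :: restA, cpA lo hi <+: y := fun y hy =>
        cpA_prefix_of_between lo y hi (hmin y hy) (hmax y hy)
      have hF_all : ∀ y ∈ i0 :: restA, restA.foldl cpA i0 <+: y := by
        intro y hy
        rcases List.mem_cons.1 hy with rfl | hy'
        · exact foldl_cpA_prefix_init restA y
        · exact foldl_cpA_prefix_mem restA i0 y hy'
      have h1 : cpA lo hi <+: restA.foldl cpA i0 :=
        prefix_foldl_cpA restA i0 _ (hcp_all i0 (List.mem_cons_self ..))
          (fun y hy => hcp_all y (List.mem_cons_of_mem _ hy))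
      have h2 : restA.foldl cpA i0 <+: cpA lo hi :=
        prefix_cpA _ _ _ (hF_all lo (hperm.mem_iff.1 (List.mem_cons_self ..)))
          (hF_all hi (hperm.mem_iff.1 (List.getLast_mem _)))
      exact h1.eq_of_length_le h2.length_le

theorem stripIndent_eq (line indent : List Char) :
    pvStripIndentA line indent =
      (if PySem.Chars.startswith line indent then line.drop indent.length else line) := by
  cases indent with
  | nil =>
    have hsw : PySem.Chars.startswith line [] = true :=
      (PySem.Chars.startswith_iff line []).2 List.nil_prefix
    simp [pvStripIndentA, hsw]
  | cons c cs => simp [pvStripIndentA]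

theorem trailing_eq (n : String) :
    (if PySem.Str.endswith n "\r\n" then ['\r', '\n']
     else if PySem.Str.endswith n "\n" then ['\n']
     else if PySem.Str.endswith n "\r" then ['\r']
     else ([] : List Char))
    = ((["\r\n", "\n", "\r"].find? (fun s => PySem.Str.endswith n s)).getD "").toList := by
  cases h1 : PySem.Str.endswith n "\r\n" <;>
    cases h2 : PySem.Str.endswith n "\n" <;>
      cases h3 : PySem.Str.endswith n "\r" <;>
        (simp at h1 h2 h3 <;> simp [List.find?, h1, h2, h3])

theorem adjust_eq (ci oi : List Char) (ls : List (List Char)) :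
    ls.foldl (fun acc line =>
        if (PySem.Chars.strip line).isEmpty then acc ++ [line]
        else acc ++ [ci ++ pvStripIndentA line oi]) []
    = ls.map (fun line =>
        if (PySem.Chars.strip line).isEmpty then line
        else ci ++ (if PySem.Chars.startswith line oi then line.drop oi.length else line)) := by
  have hfun : (fun (acc : List (List Char)) line =>
        if (PySem.Chars.strip line).isEmpty then acc ++ [line]
        else acc ++ [ci ++ pvStripIndentA line oi])
      = (fun acc line => acc ++ [if (PySem.Chars.strip line).isEmpty then line
            else ci ++ pvStripIndentA line oi]) := by
    funext acc line; split <;> rfl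
  rw [hfun, PySem.List.foldl_append_singleton_eq_map]
  simp [stripIndent_eq]

-- ===== VERDICT (by name: the statement is the Claim_ definition above) =====
theorem reindent_replacement_py_spec : Claim_equal_reindent_replacement_py := by
  intro old_text candidate_text new_text _
  show reindent_replacement_py old_text candidate_text new_text
      = reindent_replacement_py_alt old_text candidate_text new_text
  simp only [reindent_replacement_py, reindent_replacement_py_alt, commonIndent_eq]
  rw [adjust_eq, trailing_eq]
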